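-- pv_equiv track=rewrite | github.com/Shuruyue/Materials-Research | atlas/active_learning/synthesizability.py | _choose_subsets
-- ===== SOURCE A (Python) =====
-- from itertools import combinations
--
-- def _choose_subsets(elements: list[str], max_subset_nodes: int) -> list[tuple[str, ...]]:
--     n = len(elements)
--     if n <= 0:
--         return []
--
--     all_subsets: list[tuple[str, ...]] = []
--     for size in range(1, n + 1):
--         all_subsets.extend(combinations(elements, size))
--
--     if len(all_subsets) <= max_subset_nodes:
--         return all_subsets
--
--     selected: list[tuple[str, ...]] = []
--     selected_set: set[tuple[str, ...]] = set()
--     wanted_sizes = [1, 2, max(1, n - 1), n]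
--     for size in wanted_sizes:
--         for subset in combinations(elements, size):
--             if subset in selected_set:
--                 continue
--             selected.append(subset)
--             selected_set.add(subset)
--             if len(selected) >= max_subset_nodes:
--                 return selected
--
--     for subset in all_subsets:
--         if subset in selected_set:
--             continue
--         selected.append(subset)
--         selected_set.add(subset)
--         if len(selected) >= max_subset_nodes:
--             break
--     return selected
-- ===== SOURCE B (Python) =====
-- from itertools import combinations
--
-- def _choose_subsets(elements, max_subset_nodes):
--     n = len(elements)
--     if n <= 0:
--         return []
--     if 2 ** n - 1 <= max_subset_nodes:
--         return [c for k in range(1, n + 1) for c in combinations(elements, k)]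
--     # Subsets of different sizes are never equal, so the global seen-set reduces to
--     # deduplicating the size priority order and each size's combination list.
--     sizes = dict.fromkeys([1, 2, max(1, n - 1), n] + list(range(1, n + 1)))
--     out = []
--     for c in (c for k in sizes for c in dict.fromkeys(combinations(elements, k))):
--         out.append(c)
--         if len(out) >= max_subset_nodes:
--             break
--     return out
-- ===== Notes on version B (the rewrite author's own statement) =====
-- stated objective: faster
-- what changed: B drops A's global seen-set and two staged fill loops: since subsets of different sizes can never be equal, it deduplicates only the size priority order and each size's combination list (dict.fromkeys), then truncates one lazily generated stream at the cap, and it counts all subsets in closed form (2^n - 1) instead of materialising them.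
import Mathlib
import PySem

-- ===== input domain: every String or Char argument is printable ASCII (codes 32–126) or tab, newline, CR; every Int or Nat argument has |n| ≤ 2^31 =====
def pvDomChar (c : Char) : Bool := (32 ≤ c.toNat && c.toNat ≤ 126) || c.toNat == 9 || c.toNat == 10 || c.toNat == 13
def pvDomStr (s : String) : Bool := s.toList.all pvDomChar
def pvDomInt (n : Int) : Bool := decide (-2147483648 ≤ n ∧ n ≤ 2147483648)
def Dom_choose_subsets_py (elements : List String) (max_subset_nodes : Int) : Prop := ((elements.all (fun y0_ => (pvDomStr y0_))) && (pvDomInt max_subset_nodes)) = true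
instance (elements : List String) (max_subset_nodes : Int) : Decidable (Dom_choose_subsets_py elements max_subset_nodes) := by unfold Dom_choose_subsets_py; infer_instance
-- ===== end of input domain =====

-- B replaces A's global seen-set and two staged fill loops by one deduplicated-size stream
-- (subsets of different sizes never collide) truncated at the cap; counts subsets as 2^n - 1.

-- ===== PORT A =====
-- itertools.combinations(xs, k): all k-element subsequences of xs, in lexicographic index order (exact)
def pvCombos : List String → Nat → List (List String)
  | _, 0 => [[]]
  | [], _ + 1 => []
  | x :: xs, k + 1 => (pvCombos xs k).map (fun c => x :: c) ++ pvCombos xs (k + 1)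

-- A's selection loop body: skip seen, append, early-return (Bool flag = returned) when cap reached
def pvFillA (cap : Int) : List (List String) → List (List String) → PySem.Set (List String) →
    (List (List String) × PySem.Set (List String) × Bool)
  | [], sel, st => (sel, st, false)
  | c :: rest, sel, st =>
    if PySem.Set.contains st c then pvFillA cap rest sel st
    else
      let sel' := sel ++ [c]
      let st' := PySem.Set.add st c
      if cap ≤ (sel'.length : Int) then (sel', st', true)
      else pvFillA cap rest sel' st'

def choose_subsets_py (elements : List String) (max_subset_nodes : Int) : List (List String) :=
  let n : Int := elements.length
  if n ≤ 0 then []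
  else
    let all_subsets := (PySem.List.pyRange 1 (n + 1) 1).foldl
      (fun acc size => acc ++ pvCombos elements size.toNat) []
    if (all_subsets.length : Int) ≤ max_subset_nodes then all_subsets
    else
      let wanted_sizes : List Int := [1, 2, max 1 (n - 1), n]
      let cands := wanted_sizes.foldl (fun acc size => acc ++ pvCombos elements size.toNat) []
      let r := pvFillA max_subset_nodes cands [] PySem.Set.empty
      if r.2.2 then r.1
      else (pvFillA max_subset_nodes all_subsets r.1 r.2.1).1

-- ===== PORT B =====
-- B's truncation loop: append the next streamed subset, stop once the cap is reached
def pvTakeCap (cap : Int) : List (List String) → List (List String) → List (List String)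
  | out, [] => out
  | out, c :: rest =>
    let out' := out ++ [c]
    if cap ≤ (out'.length : Int) then out' else pvTakeCap cap out' rest

def choose_subsets_py_alt (elements : List String) (max_subset_nodes : Int) : List (List String) :=
  let n : Int := elements.length
  if n ≤ 0 then []
  else if (2 : Int) ^ elements.length - 1 ≤ max_subset_nodes then
    (PySem.List.pyRange 1 (n + 1) 1).flatMap (fun size => pvCombos elements size.toNat)
  else
    -- sizes = dict.fromkeys(...); per-size dedup = dict.fromkeys(combinations(...))
    let sizes := PySem.List.dedup ([1, 2, max 1 (n - 1), n] ++ PySem.List.pyRange 1 (n + 1) 1)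
    pvTakeCap max_subset_nodes []
      (sizes.flatMap (fun k => PySem.List.dedup (pvCombos elements k.toNat)))

-- ===== PRECONDITION & SPEC =====
def Spec_choose_subsets_py (elements : List String) (max_subset_nodes : Int) (out : List (List String)) : Prop := out = choose_subsets_py_alt elements max_subset_nodes
instance (elements : List String) (max_subset_nodes : Int) (out : List (List String)) : Decidable (Spec_choose_subsets_py elements max_subset_nodes out) := by unfold Spec_choose_subsets_py; infer_instance

-- ===== CLAIM (what is proved, stated in full; the proofs are below) =====
def Claim_equal_choose_subsets_py : Prop := ∀ (elements : List String) (max_subset_nodes : Int), Dom_choose_subsets_py elements max_subset_nodes → Spec_choose_subsets_py elements max_subset_nodes (choose_subsets_py elements max_subset_nodes)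

-- ===== LEMMAS AND PROOFS =====

-- Stateful first-occurrence dedup: the shape both A's seen-set loop and dict.fromkeys reduce to.
def pvDedupFrom {α : Type} [BEq α] (seen : List α) : List α → List α
  | [] => []
  | x :: xs => if seen.contains x then pvDedupFrom seen xs else x :: pvDedupFrom (seen ++ [x]) xs

theorem pvDedupFrom_congr {α : Type} [BEq α] [LawfulBEq α] (L : List α) :
    ∀ s₁ s₂ : List α, (∀ x ∈ L, x ∈ s₁ ↔ x ∈ s₂) → pvDedupFrom s₁ L = pvDedupFrom s₂ L := by
  induction L with
  | nil => intro _ _ _; rfl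
  | cons x xs ih =>
    intro s₁ s₂ h
    have hx := h x (by simp)
    simp only [pvDedupFrom, List.contains_iff_mem]
    by_cases h1 : x ∈ s₁
    · simp only [if_pos h1, if_pos (hx.mp h1)]
      exact ih _ _ (fun y hy => h y (by simp [hy]))
    · simp only [if_neg h1, if_neg (fun h2 => h1 (hx.mpr h2))]
      congr 1
      exact ih _ _ (fun y hy => by
        simp only [List.mem_append, List.mem_singleton]
        exact or_congr (h y (by simp [hy])) Iff.rfl)

theorem pvDedupFrom_append {α : Type} [BEq α] [LawfulBEq α] (L₁ L₂ : List α) :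
    ∀ s : List α, pvDedupFrom s (L₁ ++ L₂) = pvDedupFrom s L₁ ++ pvDedupFrom (s ++ L₁) L₂ := by
  induction L₁ with
  | nil => intro s; simp [pvDedupFrom]
  | cons x xs ih =>
    intro s
    simp only [List.cons_append, pvDedupFrom, List.contains_iff_mem]
    by_cases hx : x ∈ s
    · simp only [if_pos hx, ih]
      congr 1
      exact pvDedupFrom_congr _ _ _ (fun y _ => by
        simp only [List.mem_append, List.mem_cons]
        constructor
        · rintro (h | h)
          · exact Or.inl h
          · exact Or.inr (Or.inr h)
        · rintro (h | rfl | h)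
          · exact Or.inl h
          · exact Or.inl hx
          · exact Or.inr h)
    · simp only [if_neg hx, ih]
      simp

theorem pvDedupFrom_nil_of_subset {α : Type} [BEq α] [LawfulBEq α] (L : List α) :
    ∀ s : List α, (∀ x ∈ L, x ∈ s) → pvDedupFrom s L = [] := by
  induction L with
  | nil => intro _ _; rfl
  | cons x xs ih =>
    intro s h
    simp only [pvDedupFrom, List.contains_iff_mem, if_pos (h x (by simp))]
    exact ih s (fun y hy => h y (by simp [hy]))

theorem pvSet_update_eq_dedupFrom {α : Type} [BEq α] [LawfulBEq α] (L : List α) :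
    ∀ s : PySem.Set α, PySem.Set.update s L = s ++ pvDedupFrom s L := by
  induction L with
  | nil => intro s; simp [PySem.Set.update_nil, pvDedupFrom]
  | cons x xs ih =>
    intro s
    rw [PySem.Set.update_cons, pvDedupFrom]
    simp only [List.contains_iff_mem]
    by_cases hx : x ∈ s
    · rw [if_pos hx, PySem.Set.add_of_mem hx, ih]
    · rw [if_neg hx, PySem.Set.add_of_not_mem hx, ih]
      simp

theorem pvDedup_eq_dedupFrom {α : Type} [BEq α] [LawfulBEq α] (L : List α) :
    PySem.List.dedup L = pvDedupFrom [] L := by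
  have h := pvSet_update_eq_dedupFrom L (s := ([] : PySem.Set α))
  rw [PySem.Set.update_nil_left] at h
  simpa using h

theorem mem_pvCombos_length (c : List String) : ∀ (xs : List String) (k : Nat),
    c ∈ pvCombos xs k → c.length = k := by
  intro xs
  induction xs generalizing c with
  | nil => intro k hc; cases k <;> simp [pvCombos] at hc; simp [hc]
  | cons x t ih =>
    intro k hc
    cases k with
    | zero => simp [pvCombos] at hc; simp [hc]
    | succ k =>
      simp only [pvCombos, List.mem_append, List.mem_map] at hc
      rcases hc with ⟨d, hd, rfl⟩ | hc
      · simp [ih d k hd]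
      · exact ih c (k + 1) hc

-- A's fill loop IS B's truncation loop run over the deduplicated stream.
theorem pvFillA_eq_takeCap (cap : Int) (L : List (List String)) :
    ∀ (sel : List (List String)) (st : PySem.Set (List String)),
      (pvFillA cap L sel st).1 = pvTakeCap cap sel (pvDedupFrom st L) := by
  induction L with
  | nil => intro sel st; simp [pvFillA, pvDedupFrom, pvTakeCap]
  | cons c rest ih =>
    intro sel st
    simp only [pvFillA, pvDedupFrom]
    have hbridge : PySem.Set.contains st c = List.contains st c := by
      simp [PySem.Set.contains]
    by_cases hc : c ∈ st
    · simp only [hbridge, List.contains_iff_mem, if_pos hc]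
      exact ih sel st
    · simp only [hbridge, List.contains_iff_mem, if_neg hc, pvTakeCap]
      by_cases hcap : cap ≤ ((sel ++ [c]).length : Int)
      · simp only [if_pos hcap]
      · simp only [if_neg hcap]
        rw [ih (sel ++ [c]) (PySem.Set.add st c), PySem.Set.add_of_not_mem hc]

-- Deduplicating the concatenated size-wise streams = deduplicated sizes, each size deduplicated.
theorem pvDedup_flatMap_combos (elements : List String) : ∀ (S : List Int)
    (st : List (List String)) (stS : List Int),
    (∀ k, k ∈ S → 1 ≤ k) → (∀ k, k ∈ stS → 1 ≤ k) →
    (∀ c, c ∈ st ↔ ∃ k, k ∈ stS ∧ c ∈ pvCombos elements k.toNat) →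
    pvDedupFrom st (S.flatMap (fun k => pvCombos elements k.toNat))
      = (pvDedupFrom stS S).flatMap (fun k => PySem.List.dedup (pvCombos elements k.toNat)) := by
  intro S
  induction S with
  | nil => intro _ _ _ _ _; simp [pvDedupFrom]
  | cons k rest ih =>
    intro st stS hS hstS hinv
    have hk1 : 1 ≤ k := hS k (by simp)
    rw [List.flatMap_cons, pvDedupFrom_append]
    by_cases hk : k ∈ stS
    · have hsub : ∀ c ∈ pvCombos elements k.toNat, c ∈ st := by
        intro c hc; exact (hinv c).mpr ⟨k, hk, hc⟩
      rw [pvDedupFrom_nil_of_subset _ _ hsub]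
      have hcong : pvDedupFrom (st ++ pvCombos elements k.toNat)
          (rest.flatMap (fun k => pvCombos elements k.toNat))
          = pvDedupFrom st (rest.flatMap (fun k => pvCombos elements k.toNat)) := by
        apply pvDedupFrom_congr
        intro y _
        simp only [List.mem_append]
        exact ⟨fun h => h.elim id (hsub y), Or.inl⟩
      rw [hcong, ih st stS (fun j hj => hS j (by simp [hj])) hstS hinv]
      simp only [pvDedupFrom, List.contains_iff_mem, if_pos hk, List.nil_append]
    · have hdisj : ∀ c ∈ pvCombos elements k.toNat, c ∉ st := by
        intro c hc hcst
        rcases (hinv c).mp hcst with ⟨j, hj, hcj⟩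
        have h1 := mem_pvCombos_length c elements k.toNat hc
        have h2 := mem_pvCombos_length c elements j.toNat hcj
        have hj1 : 1 ≤ j := hstS j hj
        have : j = k := by omega
        exact hk (this ▸ hj)
      have hfst : pvDedupFrom st (pvCombos elements k.toNat)
          = PySem.List.dedup (pvCombos elements k.toNat) := by
        rw [pvDedup_eq_dedupFrom]
        exact pvDedupFrom_congr _ _ _ (fun y hy => by
          simp only [List.not_mem_nil, iff_false]
          exact hdisj y hy)
      have hinv' : ∀ c, c ∈ st ++ pvCombos elements k.toNat ↔
          ∃ j, j ∈ stS ++ [k] ∧ c ∈ pvCombos elements j.toNat := by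
        intro c
        simp only [List.mem_append, List.mem_singleton, hinv c]
        constructor
        · rintro (⟨j, hj, hcj⟩ | hc)
          · exact ⟨j, Or.inl hj, hcj⟩
          · exact ⟨k, Or.inr rfl, hc⟩
        · rintro ⟨j, hj | rfl, hcj⟩
          · exact Or.inl ⟨j, hj, hcj⟩
          · exact Or.inr hcj
      rw [hfst, ih (st ++ pvCombos elements k.toNat) (stS ++ [k])
        (fun j hj => hS j (by simp [hj]))
        (fun j hj => by rcases List.mem_append.mp hj with h | h
                        exacts [hstS j h, by simp at h; omega]) hinv']
      simp only [pvDedupFrom, List.contains_iff_mem, if_neg hk, List.flatMap_cons]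

theorem pvFillA_append (cap : Int) (L1 L2 : List (List String)) :
    ∀ sel st, pvFillA cap (L1 ++ L2) sel st =
      (if (pvFillA cap L1 sel st).2.2 then pvFillA cap L1 sel st
       else pvFillA cap L2 (pvFillA cap L1 sel st).1 (pvFillA cap L1 sel st).2.1) := by
  induction L1 with
  | nil => intro sel st; simp [pvFillA]
  | cons c rest ih =>
    intro sel st
    simp only [List.cons_append, pvFillA]
    split
    · exact ih sel st
    · split
      · simp
      · exact ih _ _

theorem pvFillA_two_phase (cap : Int) (L1 L2 : List (List String)) (sel : List (List String))
    (st : PySem.Set (List String)) :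
    (if (pvFillA cap L1 sel st).2.2 then (pvFillA cap L1 sel st).1
     else (pvFillA cap L2 (pvFillA cap L1 sel st).1 (pvFillA cap L1 sel st).2.1).1)
      = (pvFillA cap (L1 ++ L2) sel st).1 := by
  rw [pvFillA_append]
  split <;> rfl

theorem length_pvCombos (xs : List String) : ∀ k, (pvCombos xs k).length = Nat.choose xs.length k := by
  induction xs with
  | nil => intro k; cases k <;> simp [pvCombos]
  | cons x xs ih =>
    intro k
    cases k with
    | zero => simp [pvCombos]
    | succ k => simp [pvCombos, ih, Nat.choose]

theorem sum_choose_aux (n : Nat) :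
    ((List.range n).map (fun k => Nat.choose n (k + 1))).sum = 2 ^ n - 1 := by
  have h := Nat.sum_range_choose n
  have h' := Finset.sum_range_succ' (n.choose) n
  have h2 : ((List.range n).map (fun k => Nat.choose n (k + 1))).sum
      = ∑ i ∈ Finset.range n, n.choose (i + 1) := Nat.add_zero _
  have h3 : n.choose 0 = 1 := Nat.choose_zero_right n
  have hp : 1 ≤ 2 ^ n := Nat.one_le_two_pow
  omega

theorem all_subsets_length (elements : List String) :
    ((PySem.List.pyRange 1 ((elements.length : Int) + 1) 1).flatMap
      (fun size => pvCombos elements size.toNat)).length = 2 ^ elements.length - 1 := by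
  rw [PySem.List.pyRange_one, List.flatMap_map, List.length_flatMap]
  have hr : ((elements.length : Int) + 1 - 1).toNat = elements.length := by omega
  rw [hr]
  have hmap : (List.range elements.length).map
        (fun (a : Nat) => (pvCombos elements ((1 : Int) + (a : Int)).toNat).length)
      = (List.range elements.length).map
        (fun (k : Nat) => Nat.choose elements.length (k + 1)) := by
    apply List.map_congr_left
    intro k _
    have hk : ((1 : Int) + (k : Int)).toNat = k + 1 := by omega
    rw [hk, length_pvCombos]
  rw [hmap, sum_choose_aux]

theorem cast_pow_sub_one (n : Nat) : ((2 ^ n - 1 : Nat) : Int) = (2 : Int) ^ n - 1 := by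
  have hp : 1 ≤ 2 ^ n := Nat.one_le_two_pow
  rw [Nat.cast_sub hp]
  push_cast
  ring

-- ===== VERDICT (by name: the statement is the Claim_ definition above) =====
theorem choose_subsets_py_spec : Claim_equal_choose_subsets_py := by
  intro elements max_subset_nodes _
  unfold Spec_choose_subsets_py choose_subsets_py choose_subsets_py_alt
  have hfold : ∀ (L : List Int),
      L.foldl (fun acc size => acc ++ pvCombos elements size.toNat) []
        = L.flatMap (fun size => pvCombos elements size.toNat) := by
    intro L
    simpa using PySem.List.foldl_append_eq_flatMap
      (g := fun size => pvCombos elements size.toNat) (l := L) (acc := [])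
  by_cases h0 : (elements.length : Int) ≤ 0
  · have he : elements = [] := List.eq_nil_of_length_eq_zero (by omega)
    subst he; rfl
  · simp only [if_neg h0, hfold, all_subsets_length, cast_pow_sub_one]
    by_cases hcap : (2 : Int) ^ elements.length - 1 ≤ max_subset_nodes
    · simp [hcap]
    · simp only [if_neg hcap]
      rw [pvFillA_two_phase, ← List.flatMap_append,
        pvFillA_eq_takeCap max_subset_nodes _ [] PySem.Set.empty]
      have hS1 : ∀ k, k ∈ (([1, 2, max 1 ((elements.length : Int) - 1),
          (elements.length : Int)] : List Int) ++
          PySem.List.pyRange 1 ((elements.length : Int) + 1) 1) → 1 ≤ k := by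
        intro k hk
        rcases List.mem_append.mp hk with h | h
        · simp only [List.mem_cons, List.not_mem_nil, or_false] at h
          rcases h with rfl | rfl | rfl | rfl
          · omega
          · omega
          · exact le_max_left 1 _
          · omega
        · exact (PySem.List.mem_pyRange_one.mp h).1
      rw [show (PySem.Set.empty : PySem.Set (List String)) = [] from rfl,
        pvDedup_flatMap_combos elements _ [] [] hS1 (by simp) (by simp),
        pvDedup_eq_dedupFrom]
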